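-- pv_equiv track=rewrite | github.com/rkstu/tau2-bench | src/experiments/tau2_trace/tool_order_evaluator.py | _match_workflow_phase_order
-- ===== SOURCE A (Python) =====
-- def _match_workflow_phase_order(
--     tool_names: list[str],
--     phase_order: list[set[str]],
-- ) -> tuple[int, int]:
--     """
--     Check how well the sequence of tool names follows the expected phase order.
--     Returns (valid_transitions, total_phases_checked).
--
--     For each phase, we find the first tool call matching that phase. The sequence
--     of first-match indices must be non-decreasing for the ordering to be valid.
--     """
--     phase_first_indices: list[int] = []
--     for phase_tools in phase_order:
--         for i, name in enumerate(tool_names):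
--             if name in phase_tools:
--                 phase_first_indices.append(i)
--                 break
--
--     if len(phase_first_indices) < 2:
--         return (0, 0)
--
--     valid = 0
--     total = len(phase_first_indices) - 1
--     for i in range(1, len(phase_first_indices)):
--         if phase_first_indices[i] >= phase_first_indices[i - 1]:
--             valid += 1
--
--     return (valid, total)
-- ===== SOURCE B (Python) =====
-- def _match_workflow_phase_order(
--     tool_names: list[str],
--     phase_order: list[set[str]],
-- ) -> tuple[int, int]:
--     # One pass: first-occurrence index per tool name; then min per phase.
--     first: dict[str, int] = {}
--     for i, name in enumerate(tool_names):
--         if name not in first: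
--             first[name] = i
--
--     idxs: list[int] = []
--     for phase in phase_order:
--         cand = [first[t] for t in phase if t in first]
--         if cand:
--             idxs.append(min(cand))
--
--     if len(idxs) < 2:
--         return (0, 0)
--     valid = sum(b >= a for a, b in zip(idxs, idxs[1:]))
--     return (valid, len(idxs) - 1)
-- ===== Notes on version B (the rewrite author's own statement) =====
-- stated objective: alternative
-- what changed: Instead of rescanning tool_names for every phase with an early-break loop, B builds a first-occurrence-index dict in one pass and takes the min of its entries per phase; the transition count uses a single zip over adjacent pairs instead of indexed range access. It trades A's early exit per phase for a single precomputation pass.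
import Mathlib
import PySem

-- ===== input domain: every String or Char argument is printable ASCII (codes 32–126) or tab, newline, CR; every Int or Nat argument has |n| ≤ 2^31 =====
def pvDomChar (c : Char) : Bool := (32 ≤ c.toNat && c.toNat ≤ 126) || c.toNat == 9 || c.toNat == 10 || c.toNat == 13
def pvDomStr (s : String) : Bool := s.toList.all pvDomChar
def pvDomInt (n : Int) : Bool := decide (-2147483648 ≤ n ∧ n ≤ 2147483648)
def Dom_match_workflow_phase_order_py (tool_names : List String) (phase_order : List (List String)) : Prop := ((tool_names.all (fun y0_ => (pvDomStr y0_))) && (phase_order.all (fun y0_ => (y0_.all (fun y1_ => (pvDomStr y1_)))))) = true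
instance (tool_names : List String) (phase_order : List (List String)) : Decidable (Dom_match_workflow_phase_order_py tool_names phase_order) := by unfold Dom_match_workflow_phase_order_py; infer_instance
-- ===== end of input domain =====

-- B replaces A's per-phase rescan of tool_names by one first-occurrence-index pass plus a min per phase (alternative algorithm, same result).

-- ===== PORT A =====
-- inner 'for i, name in enumerate(tool_names): if name in phase_tools: …; break'
def pvFirstLoop (phase : List String) : List (Int × String) → Option Int
  | [] => none
  | (i, name) :: rest => if phase.contains name then some i else pvFirstLoop phase rest

def match_workflow_phase_order_py (tool_names : List String) (phase_order : List (List String)) : List Int :=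
  let idxs := phase_order.foldl (fun acc ph =>
    match pvFirstLoop ph (PySem.List.enumerate tool_names 0) with
    | some i => acc ++ [i]
    | none => acc) []
  if idxs.length < 2 then [0, 0]
  else
    let total : Int := (idxs.length : Int) - 1
    let valid : Int := (PySem.List.pyRange 1 (idxs.length : Int) 1).foldl
      (fun v i => if PySem.List.pyGetD idxs (i - 1) 0 ≤ PySem.List.pyGetD idxs i 0 then v + 1 else v) 0
    [valid, total]

-- ===== PORT B =====
def match_workflow_phase_order_py_alt (tool_names : List String) (phase_order : List (List String)) : List Int :=
  let first : PySem.Dict String Int := (PySem.List.enumerate tool_names 0).foldl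
    (fun d p => if d.contains p.2 then d else d.insert p.2 p.1) PySem.Dict.empty
  let idxs := phase_order.foldl (fun acc ph =>
    -- cand = [first[t] for t in phase if t in first]
    let cand := ph.filterMap (fun t => first.get? t)
    match PySem.List.min? cand (fun x => x) with
    | some m => acc ++ [m]
    | none => acc) []
  if idxs.length < 2 then [0, 0]
  else
    let valid : Int := (idxs.zip (PySem.List.slice idxs (some 1) none)).foldl
      (fun v p => if p.1 ≤ p.2 then v + 1 else v) 0
    [valid, (idxs.length : Int) - 1]

-- ===== PRECONDITION & SPEC =====
def Spec_match_workflow_phase_order_py (tool_names : List String) (phase_order : List (List String)) (out : List Int) : Prop := out = match_workflow_phase_order_py_alt tool_names phase_order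
instance (tool_names : List String) (phase_order : List (List String)) (out : List Int) : Decidable (Spec_match_workflow_phase_order_py tool_names phase_order out) := by unfold Spec_match_workflow_phase_order_py; infer_instance

-- ===== CLAIM (what is proved, stated in full; the proofs are below) =====
def Claim_equal_match_workflow_phase_order_py : Prop := ∀ (tool_names : List String) (phase_order : List (List String)), Dom_match_workflow_phase_order_py tool_names phase_order → Spec_match_workflow_phase_order_py tool_names phase_order (match_workflow_phase_order_py tool_names phase_order)

-- ===== LEMMAS AND PROOFS =====

-- B's dict maps each name to its first index in the scanned list (shifted by the enumerate start)
theorem pvDict_char (ts : List String) : ∀ (s : Int) (d : PySem.Dict String Int) (t : String),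
    ((PySem.List.enumerate ts s).foldl (fun d p => if d.contains p.2 then d else d.insert p.2 p.1) d).get? t
      = (d.get? t).or ((ts.idxOf? t).map (fun k => s + (k : Int))) := by
  induction ts with
  | nil => intro s d t; simp [PySem.List.enumerate_nil]
  | cons n rest ih =>
    intro s d t
    rw [PySem.List.enumerate_cons]
    simp only [List.foldl_cons]
    rw [ih]
    by_cases hdn : d.contains n = true
    · simp only [hdn, if_true]
      by_cases htn : t = n
      · subst htn
        have hs : (d.get? t).isSome := by
          rw [← PySem.Dict.contains_eq_isSome_get?]; exact hdn
        cases h : d.get? t with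
        | none => simp [h] at hs
        | some v => simp [Option.or]
      · rw [List.idxOf?_cons]
        have hbe : (n == t) = false := by simp [Ne.symm htn]
        simp only [hbe, Bool.false_eq_true, if_false]
        cases h : rest.idxOf? t <;> cases hd : d.get? t <;>
          simp [Option.or] <;> push_cast <;> ring_nf
    · simp only [hdn, Bool.false_eq_true, if_false]
      have hdn' : d.get? n = none := by
        cases h : d.get? n with
        | none => rfl
        | some v => rw [PySem.Dict.contains_eq_isSome_get?, h] at hdn; simp at hdn
      by_cases htn : t = n
      · subst htn
        rw [PySem.Dict.get?_insert_self, hdn', List.idxOf?_cons]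
        simp [Option.or]
      · rw [PySem.Dict.get?_insert_of_ne _ _ htn, List.idxOf?_cons]
        have hbe : (n == t) = false := by simp [Ne.symm htn]
        simp only [hbe, Bool.false_eq_true, if_false]
        cases h : rest.idxOf? t <;> cases hd : d.get? t <;>
          simp [Option.or] <;> push_cast <;> ring_nf

-- A's inner break-loop is findIdx? shifted by the enumerate start
theorem pvFirstLoop_eq (ph : List String) (ts : List String) : ∀ (s : Int),
    pvFirstLoop ph (PySem.List.enumerate ts s)
      = (ts.findIdx? (fun n => ph.contains n)).map (fun k => s + (k : Int)) := by
  induction ts with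
  | nil => intro s; simp [PySem.List.enumerate_nil, pvFirstLoop]
  | cons n rest ih =>
    intro s
    rw [PySem.List.enumerate_cons]
    simp only [pvFirstLoop, List.findIdx?_cons]
    by_cases h : n ∈ ph
    · simp [h]
    · simp only [h, List.contains_iff_mem, ih]
      cases hf : rest.findIdx? (fun n => ph.contains n) <;>
        simp at hf <;> simp [hf] <;> push_cast <;> ring

theorem pvFoldl_min_succ (t : List Int) : ∀ x : Int,
    (t.map (· + 1)).foldl min (x + 1) = t.foldl min x + 1 := by
  induction t with
  | nil => intro x; simp
  | cons a t ih => intro x; simp only [List.map_cons, List.foldl_cons, min_add_add_right]; exact ih _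

theorem pvMin_map_succ (xs : List Int) :
    PySem.List.min? (xs.map (· + 1)) (fun x => x) = (PySem.List.min? xs (fun x => x)).map (· + 1) := by
  cases xs with
  | nil => simp [PySem.List.min?]
  | cons x t => simp [PySem.List.min?_id_cons, pvFoldl_min_succ]

theorem pvMin_zero (xs : List Int) (h0 : (0:Int) ∈ xs) (hnn : ∀ x ∈ xs, 0 ≤ x) :
    PySem.List.min? xs (fun x => x) = some 0 := by
  cases hm : PySem.List.min? xs (fun x => x) with
  | none =>
    rw [PySem.List.min?_eq_none_iff] at hm
    subst hm; simp at h0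
  | some m =>
    have hmem := PySem.List.min?_mem hm
    have hle := PySem.List.min?_isMin hm 0 h0
    have hge := hnn m hmem
    have : m = 0 := le_antisymm hle hge
    rw [this]

-- min of the first-occurrence indices of the phase members = first index whose name is in the phase
theorem pvMin_cand (ph : List String) (ts : List String) :
    PySem.List.min? (ph.filterMap (fun t => (ts.idxOf? t).map (fun k => ((k : Nat) : Int)))) (fun x => x)
      = (ts.findIdx? (fun n => ph.contains n)).map (fun k => ((k : Nat) : Int)) := by
  induction ts with
  | nil => simp [PySem.List.min?]
  | cons n ts ih =>
    by_cases hn : n ∈ ph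
    · have h0 : (0:Int) ∈ ph.filterMap (fun t => (List.idxOf? t (n :: ts)).map (fun k => ((k : Nat) : Int))) := by
        rw [List.mem_filterMap]
        exact ⟨n, hn, by simp [List.idxOf?_cons]⟩
      rw [pvMin_zero _ h0]
      · simp [List.findIdx?_cons, hn]
      · intro x hx
        rw [List.mem_filterMap] at hx
        obtain ⟨t, _, ht⟩ := hx
        cases hio : List.idxOf? t (n :: ts) <;> simp [hio] at ht
        omega
    · have hcand : ph.filterMap (fun t => (List.idxOf? t (n :: ts)).map (fun k => ((k : Nat) : Int)))
          = (ph.filterMap (fun t => (ts.idxOf? t).map (fun k => ((k : Nat) : Int)))).map (· + 1) := by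
        rw [List.map_filterMap]
        apply List.filterMap_congr
        intro t ht
        have htn : (n == t) = false := by
          simp only [beq_eq_false_iff_ne]; intro h; exact hn (h ▸ ht)
        rw [List.idxOf?_cons]
        simp only [htn, Bool.false_eq_true, if_false]
        cases h : ts.idxOf? t <;> simp <;> push_cast <;> ring
      rw [hcand, pvMin_map_succ, ih]
      simp only [List.findIdx?_cons]
      simp only [List.contains_iff_mem, hn, decide_false, Bool.false_eq_true, if_false]
      cases h : ts.findIdx? (fun n => ph.contains n) <;> simp <;> push_cast <;> ring

-- counting loop: indexed range form = adjacent-pairs form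
theorem pvCount_aux (t0 : List Int) : ∀ a : Int,
    (PySem.List.pyRange 1 ((t0.length : Int) + 1) 1).countP
        (fun i => decide (PySem.List.pyGetD (a :: t0) (i - 1) 0 ≤ PySem.List.pyGetD (a :: t0) i 0))
      = ((a :: t0).zip t0).countP (fun p => decide (p.1 ≤ p.2)) := by
  induction t0 with
  | nil => intro a; simp [PySem.List.pyRange_one_eq_nil]
  | cons b t ih =>
    intro a
    have hlen : ((b :: t).length : Int) + 1 = (t.length : Int) + 2 := by simp; ring
    rw [hlen, PySem.List.pyRange_one_cons (by omega : (1:Int) < (t.length : Int) + 2)]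
    rw [List.countP_cons]
    rw [show PySem.List.pyRange (1 + 1) ((t.length : Int) + 2) 1
          = PySem.List.pyRange 2 ((t.length : Int) + 2) 1 by norm_num]
    have h1 : (decide (PySem.List.pyGetD (a :: b :: t) (1 - 1) 0 ≤ PySem.List.pyGetD (a :: b :: t) 1 0))
        = decide (a ≤ b) := by norm_num; simp [pysem]
    have hshift : PySem.List.pyRange 2 ((t.length : Int) + 2) 1
        = (List.range t.length).map (fun (m : Nat) => 2 + (m : Int)) := by
      rw [PySem.List.pyRange_one]; norm_num
    have hbase : PySem.List.pyRange 1 ((t.length : Int) + 1) 1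
        = (List.range t.length).map (fun (m : Nat) => 1 + (m : Int)) := by
      rw [PySem.List.pyRange_one]; norm_num
    have hmain : (PySem.List.pyRange 2 ((t.length : Int) + 2) 1).countP
          (fun i => decide (PySem.List.pyGetD (a :: b :: t) (i - 1) 0 ≤ PySem.List.pyGetD (a :: b :: t) i 0))
        = (PySem.List.pyRange 1 ((t.length : Int) + 1) 1).countP
          (fun i => decide (PySem.List.pyGetD (b :: t) (i - 1) 0 ≤ PySem.List.pyGetD (b :: t) i 0)) := by
      rw [hshift, hbase, List.countP_map, List.countP_map]
      apply List.countP_congr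
      intro k _
      simp only [Function.comp_apply]
      have g1 : PySem.List.pyGetD (a :: b :: t) (2 + (k : Int) - 1) 0
          = PySem.List.pyGetD (b :: t) (1 + (k : Int) - 1) 0 := by
        rw [show (2 + (k : Int) - 1) = ((k + 1 : Nat) : Int) by push_cast; ring,
            show (1 + (k : Int) - 1) = ((k : Nat) : Int) by push_cast; ring]
        rw [PySem.List.pyGetD_natCast, PySem.List.pyGetD_natCast]
        simp
      have g2 : PySem.List.pyGetD (a :: b :: t) (2 + (k : Int)) 0
          = PySem.List.pyGetD (b :: t) (1 + (k : Int)) 0 := by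
        rw [show (2 + (k : Int)) = ((k + 2 : Nat) : Int) by push_cast; ring,
            show (1 + (k : Int)) = ((k + 1 : Nat) : Int) by push_cast; ring]
        rw [PySem.List.pyGetD_natCast, PySem.List.pyGetD_natCast]
        simp
      rw [g1, g2]
    rw [hmain, ih b, h1]
    simp only [List.zip_cons_cons, List.countP_cons]

theorem pvCount_eq (l : List Int) :
    (PySem.List.pyRange 1 (l.length : Int) 1).foldl
      (fun v i => if PySem.List.pyGetD l (i - 1) 0 ≤ PySem.List.pyGetD l i 0 then v + 1 else v) (0 : Int)
      = (l.zip (l.drop 1)).foldl (fun v p => if p.1 ≤ p.2 then v + 1 else v) 0 := by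
  cases l with
  | nil => simp [PySem.List.pyRange_one_eq_nil]
  | cons a t =>
    rw [PySem.List.foldl_ite_add_one, PySem.List.foldl_ite_add_one]
    rw [show ((a :: t).length : Int) = (t.length : Int) + 1 by simp]
    simp only [List.drop_succ_cons, List.drop_zero]
    rw [pvCount_aux t a]

-- ===== VERDICT (by name: the statement is the Claim_ definition above) =====
theorem match_workflow_phase_order_py_spec : Claim_equal_match_workflow_phase_order_py := by
  intro tools phases _
  unfold Spec_match_workflow_phase_order_py
  unfold match_workflow_phase_order_py match_workflow_phase_order_py_alt
  have hdict : ∀ t : String,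
      ((PySem.List.enumerate tools 0).foldl
          (fun d p => if d.contains p.2 then d else d.insert p.2 p.1) PySem.Dict.empty).get? t
        = (tools.idxOf? t).map (fun k => ((k : Nat) : Int)) := by
    intro t
    rw [pvDict_char]
    cases h : List.idxOf? t tools <;> simp [h, Option.or]
  have hphase : ∀ (acc : List Int) (ph : List String),
      (match pvFirstLoop ph (PySem.List.enumerate tools 0) with
        | some i => acc ++ [i] | none => acc)
      = (match PySem.List.min? (ph.filterMap (fun t =>
            ((PySem.List.enumerate tools 0).foldl
              (fun d p => if d.contains p.2 then d else d.insert p.2 p.1) PySem.Dict.empty).get? t)) (fun x => x) with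
        | some m => acc ++ [m] | none => acc) := by
    intro acc ph
    have : PySem.List.min? (ph.filterMap (fun t =>
            ((PySem.List.enumerate tools 0).foldl
              (fun d p => if d.contains p.2 then d else d.insert p.2 p.1) PySem.Dict.empty).get? t)) (fun x => x)
        = pvFirstLoop ph (PySem.List.enumerate tools 0) := by
      simp only [hdict]
      rw [pvMin_cand, pvFirstLoop_eq]
      cases h : tools.findIdx? (fun n => ph.contains n) <;> simp [h]
    rw [this]
  have hidx : phases.foldl (fun acc ph =>
        match pvFirstLoop ph (PySem.List.enumerate tools 0) with
        | some i => acc ++ [i] | none => acc) []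
      = phases.foldl (fun acc ph =>
        match PySem.List.min? (ph.filterMap (fun t =>
            ((PySem.List.enumerate tools 0).foldl
              (fun d p => if d.contains p.2 then d else d.insert p.2 p.1) PySem.Dict.empty).get? t)) (fun x => x) with
        | some m => acc ++ [m] | none => acc) [] := by
    apply PySem.List.foldl_congr_mem
    intro acc x _
    exact hphase acc x
  simp only [← hidx]
  by_cases hlen : (phases.foldl (fun acc ph =>
      match pvFirstLoop ph (PySem.List.enumerate tools 0) with
      | some i => acc ++ [i] | none => acc) []).length < 2
  · simp [hlen]
  · simp only [hlen, if_false]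
    rw [PySem.List.slice_from_one, ← List.drop_one, pvCount_eq]
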